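-- pv_equiv track=rewrite | github.com/inorrr/Project-Connection-between-COVID-and-Crime | analysis_3.py | month_interval
-- ===== SOURCE A (Python) =====
-- def month_interval(year: int, month: int) -> list[tuple[int, int]]:
--     """
--     returns a list of a 9 month interval centered at
--     the given month and year
--
--     Preconditions:
--         - 2019 <= year <= 2021
--         - 1 <= month <= 12
--
--     >>> year = 2020
--     >>> month = 8
--     >>> month_interval(year, month)
--     [(2020, 4), (2020, 5), (2020, 6), (2020, 7), (2020, 8), (2020, 9), \
--     (2020, 10),(2020, 11), (2020, 12)]
--     """
--     lst = [(year, month)]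
--
--     for x in range(1, 5):
--         if month - x >= 1:
--             lst.insert(0, (year, month - x))
--         else:
--             lst.insert(0, (year - 1, month - x + 12))
--
--     for x in range(1, 5):
--         if month + x <= 12:
--             lst.append((year, month + x))
--         else:
--             lst.append((year + 1, (month + x) % 12))
--
--     return lst
-- ===== SOURCE B (Python) =====
-- def month_interval(year: int, month: int) -> list[tuple[int, int]]:
--     # split points instead of per-element branching: k prefix months wrap back,
--     # j suffix months wrap forward; build three homogeneous segments
--     k = min(4, max(0, 5 - month))
--     j = min(4, max(0, month - 8))
--     out = [(year - 1, m + 12) for m in range(month - 4, month - 4 + k)]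
--     out += [(year, m) for m in range(month - 4 + k, month + 5 - j)]
--     out += [(year + 1, m % 12) for m in range(month + 5 - j, month + 5)]
--     return out
-- ===== Notes on version B (the rewrite author's own statement) =====
-- stated objective: alternative
-- what changed: Replaces A's two accumulator loops with per-element >=1/<=12 wrap branches (insert(0) front-building, then appending) by computing the two wrap counts up front (k = min(4, max(0, 5-month)), j = min(4, max(0, month-8))) and concatenating three homogeneous branch-free segments over month ranges.
import Mathlib
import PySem

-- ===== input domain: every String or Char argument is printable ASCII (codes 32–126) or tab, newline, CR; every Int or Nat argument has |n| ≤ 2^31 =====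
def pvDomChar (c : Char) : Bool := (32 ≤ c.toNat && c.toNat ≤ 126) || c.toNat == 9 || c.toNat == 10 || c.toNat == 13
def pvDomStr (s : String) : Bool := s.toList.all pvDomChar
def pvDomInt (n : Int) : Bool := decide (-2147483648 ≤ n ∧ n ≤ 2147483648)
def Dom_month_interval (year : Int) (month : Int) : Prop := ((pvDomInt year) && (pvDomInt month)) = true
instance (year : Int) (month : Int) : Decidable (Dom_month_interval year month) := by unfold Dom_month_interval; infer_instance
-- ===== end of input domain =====

-- B replaces A's per-element wrap casework (two accumulator loops with insert(0)
-- front-building and >=1 / <=12 branches) by computing the two wrap counts k and j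
-- up front and concatenating three homogeneous branch-free segments; objective: simpler.

-- ===== PORT A =====
def month_interval (year : Int) (month : Int) : List (Int × Int) :=
  -- lst = [(year, month)]; first loop prepends via insert(0, …), second loop appends;
  -- each branch builds the chosen pair, written as one if-expression per element
  (PySem.List.pyRange 1 5 1).foldl (fun l x =>
      l ++ [if month + x ≤ 12 then (year, month + x)
            else (year + 1, PySem.Int.mod (month + x) 12)])
    ((PySem.List.pyRange 1 5 1).foldl (fun l x =>
      (if month - x ≥ 1 then (year, month - x) else (year - 1, month - x + 12)) :: l)
      [(year, month)])

-- ===== PORT B =====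
def month_interval_alt (year : Int) (month : Int) : List (Int × Int) :=
  -- k = min(4, max(0, 5 - month)); j = min(4, max(0, month - 8)); three segments
  let k := min 4 (max 0 (5 - month))
  let j := min 4 (max 0 (month - 8))
  ((PySem.List.pyRange (month - 4) (month - 4 + k) 1).map (fun m => (year - 1, m + 12)))
  ++ ((PySem.List.pyRange (month - 4 + k) (month + 5 - j) 1).map (fun m => (year, m)))
  ++ ((PySem.List.pyRange (month + 5 - j) (month + 5) 1).map (fun m => (year + 1, PySem.Int.mod m 12)))

-- ===== PRECONDITION & SPEC =====
def Spec_month_interval (year : Int) (month : Int) (out : List (Int × Int)) : Prop := out = month_interval_alt year month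
instance (year : Int) (month : Int) (out : List (Int × Int)) : Decidable (Spec_month_interval year month out) := by unfold Spec_month_interval; infer_instance

-- ===== CLAIM (what is proved, stated in full; the proofs are below) =====
def Claim_equal_month_interval : Prop := ∀ (year : Int) (month : Int), Dom_month_interval year month → Spec_month_interval year month (month_interval year month)

-- ===== LEMMAS AND PROOFS =====
-- case analysis on the wrap counts: nine month regions, each fixing k and j

theorem month_interval_eq_1 (year month : Int) (h : month ≤ 1) :
    month_interval year month = month_interval_alt year month := by
  unfold month_interval month_interval_alt
  rw [show PySem.List.pyRange 1 5 1 = [1, 2, 3, 4] from by decide,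
      show min 4 (max 0 (5 - month)) = 4 from by omega,
      show min 4 (max 0 (month - 8)) = 0 from by omega]
  simp only [List.foldl_cons, List.foldl_nil]
  rw [      show PySem.List.pyRange (month - 4) (month - 4 + 4) 1 = [month - 4, month - 3, month - 2, month - 1] from by
        rw [PySem.List.pyRange_one_cons (by omega), PySem.List.pyRange_one_cons (by omega), PySem.List.pyRange_one_cons (by omega), PySem.List.pyRange_one_cons (by omega), PySem.List.pyRange_one_eq_nil (by omega)]
        all_goals simp only [List.cons.injEq, and_true, true_and]
        all_goals omega,
      show PySem.List.pyRange (month - 4 + 4) (month + 5 - 0) 1 = [month, month + 1, month + 2, month + 3, month + 4] from by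
        rw [PySem.List.pyRange_one_cons (by omega), PySem.List.pyRange_one_cons (by omega), PySem.List.pyRange_one_cons (by omega), PySem.List.pyRange_one_cons (by omega), PySem.List.pyRange_one_cons (by omega), PySem.List.pyRange_one_eq_nil (by omega)]
        all_goals simp only [List.cons.injEq, and_true, true_and]
        all_goals omega,
      PySem.List.pyRange_one_eq_nil (a := month + 5 - 0) (b := month + 5) (by omega)]
  simp only [List.map_cons, List.map_nil, List.cons_append, List.nil_append, List.append_nil,
    List.cons.injEq]
  refine ⟨?_, ?_, ?_, ?_, ?_, ?_, ?_, ?_, ?_⟩ <;>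
    first
      | trivial
      | (split_ifs <;>
          simp only [Prod.mk.injEq, PySem.Int.mod_eq_emod_of_pos (b := 12) (by norm_num)] <;>
          (first | trivial | omega))

theorem month_interval_eq_2 (year month : Int) (h : month = 2) :
    month_interval year month = month_interval_alt year month := by
  unfold month_interval month_interval_alt
  rw [show PySem.List.pyRange 1 5 1 = [1, 2, 3, 4] from by decide,
      show min 4 (max 0 (5 - month)) = 3 from by omega,
      show min 4 (max 0 (month - 8)) = 0 from by omega]
  simp only [List.foldl_cons, List.foldl_nil]
  rw [      show PySem.List.pyRange (month - 4) (month - 4 + 3) 1 = [month - 4, month - 3, month - 2] from by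
        rw [PySem.List.pyRange_one_cons (by omega), PySem.List.pyRange_one_cons (by omega), PySem.List.pyRange_one_cons (by omega), PySem.List.pyRange_one_eq_nil (by omega)]
        all_goals simp only [List.cons.injEq, and_true, true_and]
        all_goals omega,
      show PySem.List.pyRange (month - 4 + 3) (month + 5 - 0) 1 = [month - 1, month, month + 1, month + 2, month + 3, month + 4] from by
        rw [PySem.List.pyRange_one_cons (by omega), PySem.List.pyRange_one_cons (by omega), PySem.List.pyRange_one_cons (by omega), PySem.List.pyRange_one_cons (by omega), PySem.List.pyRange_one_cons (by omega), PySem.List.pyRange_one_cons (by omega), PySem.List.pyRange_one_eq_nil (by omega)]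
        all_goals simp only [List.cons.injEq, and_true, true_and]
        all_goals omega,
      PySem.List.pyRange_one_eq_nil (a := month + 5 - 0) (b := month + 5) (by omega)]
  simp only [List.map_cons, List.map_nil, List.cons_append, List.nil_append, List.append_nil,
    List.cons.injEq]
  refine ⟨?_, ?_, ?_, ?_, ?_, ?_, ?_, ?_, ?_⟩ <;>
    first
      | trivial
      | (split_ifs <;>
          simp only [Prod.mk.injEq, PySem.Int.mod_eq_emod_of_pos (b := 12) (by norm_num)] <;>
          (first | trivial | omega))

theorem month_interval_eq_3 (year month : Int) (h : month = 3) :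
    month_interval year month = month_interval_alt year month := by
  unfold month_interval month_interval_alt
  rw [show PySem.List.pyRange 1 5 1 = [1, 2, 3, 4] from by decide,
      show min 4 (max 0 (5 - month)) = 2 from by omega,
      show min 4 (max 0 (month - 8)) = 0 from by omega]
  simp only [List.foldl_cons, List.foldl_nil]
  rw [      show PySem.List.pyRange (month - 4) (month - 4 + 2) 1 = [month - 4, month - 3] from by
        rw [PySem.List.pyRange_one_cons (by omega), PySem.List.pyRange_one_cons (by omega), PySem.List.pyRange_one_eq_nil (by omega)]
        all_goals simp only [List.cons.injEq, and_true, true_and]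
        all_goals omega,
      show PySem.List.pyRange (month - 4 + 2) (month + 5 - 0) 1 = [month - 2, month - 1, month, month + 1, month + 2, month + 3, month + 4] from by
        rw [PySem.List.pyRange_one_cons (by omega), PySem.List.pyRange_one_cons (by omega), PySem.List.pyRange_one_cons (by omega), PySem.List.pyRange_one_cons (by omega), PySem.List.pyRange_one_cons (by omega), PySem.List.pyRange_one_cons (by omega), PySem.List.pyRange_one_cons (by omega), PySem.List.pyRange_one_eq_nil (by omega)]
        all_goals simp only [List.cons.injEq, and_true, true_and]
        all_goals omega,
      PySem.List.pyRange_one_eq_nil (a := month + 5 - 0) (b := month + 5) (by omega)]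
  simp only [List.map_cons, List.map_nil, List.cons_append, List.nil_append, List.append_nil,
    List.cons.injEq]
  refine ⟨?_, ?_, ?_, ?_, ?_, ?_, ?_, ?_, ?_⟩ <;>
    first
      | trivial
      | (split_ifs <;>
          simp only [Prod.mk.injEq, PySem.Int.mod_eq_emod_of_pos (b := 12) (by norm_num)] <;>
          (first | trivial | omega))

theorem month_interval_eq_4 (year month : Int) (h : month = 4) :
    month_interval year month = month_interval_alt year month := by
  unfold month_interval month_interval_alt
  rw [show PySem.List.pyRange 1 5 1 = [1, 2, 3, 4] from by decide,
      show min 4 (max 0 (5 - month)) = 1 from by omega,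
      show min 4 (max 0 (month - 8)) = 0 from by omega]
  simp only [List.foldl_cons, List.foldl_nil]
  rw [      show PySem.List.pyRange (month - 4) (month - 4 + 1) 1 = [month - 4] from by
        rw [PySem.List.pyRange_one_cons (by omega), PySem.List.pyRange_one_eq_nil (by omega)]
        all_goals simp only [List.cons.injEq, and_true, true_and]
        all_goals omega,
      show PySem.List.pyRange (month - 4 + 1) (month + 5 - 0) 1 = [month - 3, month - 2, month - 1, month, month + 1, month + 2, month + 3, month + 4] from by
        rw [PySem.List.pyRange_one_cons (by omega), PySem.List.pyRange_one_cons (by omega), PySem.List.pyRange_one_cons (by omega), PySem.List.pyRange_one_cons (by omega), PySem.List.pyRange_one_cons (by omega), PySem.List.pyRange_one_cons (by omega), PySem.List.pyRange_one_cons (by omega), PySem.List.pyRange_one_cons (by omega), PySem.List.pyRange_one_eq_nil (by omega)]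
        all_goals simp only [List.cons.injEq, and_true, true_and]
        all_goals omega,
      PySem.List.pyRange_one_eq_nil (a := month + 5 - 0) (b := month + 5) (by omega)]
  simp only [List.map_cons, List.map_nil, List.cons_append, List.nil_append, List.append_nil,
    List.cons.injEq]
  refine ⟨?_, ?_, ?_, ?_, ?_, ?_, ?_, ?_, ?_⟩ <;>
    first
      | trivial
      | (split_ifs <;>
          simp only [Prod.mk.injEq, PySem.Int.mod_eq_emod_of_pos (b := 12) (by norm_num)] <;>
          (first | trivial | omega))

theorem month_interval_eq_5 (year month : Int) (h : 5 ≤ month ∧ month ≤ 8) :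
    month_interval year month = month_interval_alt year month := by
  unfold month_interval month_interval_alt
  rw [show PySem.List.pyRange 1 5 1 = [1, 2, 3, 4] from by decide,
      show min 4 (max 0 (5 - month)) = 0 from by omega,
      show min 4 (max 0 (month - 8)) = 0 from by omega]
  simp only [List.foldl_cons, List.foldl_nil]
  rw [      PySem.List.pyRange_one_eq_nil (a := month - 4) (b := month - 4 + 0) (by omega),
      show PySem.List.pyRange (month - 4 + 0) (month + 5 - 0) 1 = [month - 4, month - 3, month - 2, month - 1, month, month + 1, month + 2, month + 3, month + 4] from by
        rw [PySem.List.pyRange_one_cons (by omega), PySem.List.pyRange_one_cons (by omega), PySem.List.pyRange_one_cons (by omega), PySem.List.pyRange_one_cons (by omega), PySem.List.pyRange_one_cons (by omega), PySem.List.pyRange_one_cons (by omega), PySem.List.pyRange_one_cons (by omega), PySem.List.pyRange_one_cons (by omega), PySem.List.pyRange_one_cons (by omega), PySem.List.pyRange_one_eq_nil (by omega)]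
        all_goals simp only [List.cons.injEq, and_true, true_and]
        all_goals omega,
      PySem.List.pyRange_one_eq_nil (a := month + 5 - 0) (b := month + 5) (by omega)]
  simp only [List.map_cons, List.map_nil, List.cons_append, List.nil_append, List.append_nil,
    List.cons.injEq]
  refine ⟨?_, ?_, ?_, ?_, ?_, ?_, ?_, ?_, ?_⟩ <;>
    first
      | trivial
      | (split_ifs <;>
          simp only [Prod.mk.injEq, PySem.Int.mod_eq_emod_of_pos (b := 12) (by norm_num)] <;>
          (first | trivial | omega))

theorem month_interval_eq_6 (year month : Int) (h : month = 9) :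
    month_interval year month = month_interval_alt year month := by
  unfold month_interval month_interval_alt
  rw [show PySem.List.pyRange 1 5 1 = [1, 2, 3, 4] from by decide,
      show min 4 (max 0 (5 - month)) = 0 from by omega,
      show min 4 (max 0 (month - 8)) = 1 from by omega]
  simp only [List.foldl_cons, List.foldl_nil]
  rw [      PySem.List.pyRange_one_eq_nil (a := month - 4) (b := month - 4 + 0) (by omega),
      show PySem.List.pyRange (month - 4 + 0) (month + 5 - 1) 1 = [month - 4, month - 3, month - 2, month - 1, month, month + 1, month + 2, month + 3] from by
        rw [PySem.List.pyRange_one_cons (by omega), PySem.List.pyRange_one_cons (by omega), PySem.List.pyRange_one_cons (by omega), PySem.List.pyRange_one_cons (by omega), PySem.List.pyRange_one_cons (by omega), PySem.List.pyRange_one_cons (by omega), PySem.List.pyRange_one_cons (by omega), PySem.List.pyRange_one_cons (by omega), PySem.List.pyRange_one_eq_nil (by omega)]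
        all_goals simp only [List.cons.injEq, and_true, true_and]
        all_goals omega,
      show PySem.List.pyRange (month + 5 - 1) (month + 5) 1 = [month + 4] from by
        rw [PySem.List.pyRange_one_cons (by omega), PySem.List.pyRange_one_eq_nil (by omega)]
        all_goals simp only [List.cons.injEq, and_true, true_and]
        all_goals omega]
  simp only [List.map_cons, List.map_nil, List.cons_append, List.nil_append, List.append_nil,
    List.cons.injEq]
  refine ⟨?_, ?_, ?_, ?_, ?_, ?_, ?_, ?_, ?_⟩ <;>
    first
      | trivial
      | (split_ifs <;>
          simp only [Prod.mk.injEq, PySem.Int.mod_eq_emod_of_pos (b := 12) (by norm_num)] <;>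
          (first | trivial | omega))

theorem month_interval_eq_7 (year month : Int) (h : month = 10) :
    month_interval year month = month_interval_alt year month := by
  unfold month_interval month_interval_alt
  rw [show PySem.List.pyRange 1 5 1 = [1, 2, 3, 4] from by decide,
      show min 4 (max 0 (5 - month)) = 0 from by omega,
      show min 4 (max 0 (month - 8)) = 2 from by omega]
  simp only [List.foldl_cons, List.foldl_nil]
  rw [      PySem.List.pyRange_one_eq_nil (a := month - 4) (b := month - 4 + 0) (by omega),
      show PySem.List.pyRange (month - 4 + 0) (month + 5 - 2) 1 = [month - 4, month - 3, month - 2, month - 1, month, month + 1, month + 2] from by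
        rw [PySem.List.pyRange_one_cons (by omega), PySem.List.pyRange_one_cons (by omega), PySem.List.pyRange_one_cons (by omega), PySem.List.pyRange_one_cons (by omega), PySem.List.pyRange_one_cons (by omega), PySem.List.pyRange_one_cons (by omega), PySem.List.pyRange_one_cons (by omega), PySem.List.pyRange_one_eq_nil (by omega)]
        all_goals simp only [List.cons.injEq, and_true, true_and]
        all_goals omega,
      show PySem.List.pyRange (month + 5 - 2) (month + 5) 1 = [month + 3, month + 4] from by
        rw [PySem.List.pyRange_one_cons (by omega), PySem.List.pyRange_one_cons (by omega), PySem.List.pyRange_one_eq_nil (by omega)]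
        all_goals simp only [List.cons.injEq, and_true, true_and]
        all_goals omega]
  simp only [List.map_cons, List.map_nil, List.cons_append, List.nil_append, List.append_nil,
    List.cons.injEq]
  refine ⟨?_, ?_, ?_, ?_, ?_, ?_, ?_, ?_, ?_⟩ <;>
    first
      | trivial
      | (split_ifs <;>
          simp only [Prod.mk.injEq, PySem.Int.mod_eq_emod_of_pos (b := 12) (by norm_num)] <;>
          (first | trivial | omega))

theorem month_interval_eq_8 (year month : Int) (h : month = 11) :
    month_interval year month = month_interval_alt year month := by
  unfold month_interval month_interval_alt
  rw [show PySem.List.pyRange 1 5 1 = [1, 2, 3, 4] from by decide,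
      show min 4 (max 0 (5 - month)) = 0 from by omega,
      show min 4 (max 0 (month - 8)) = 3 from by omega]
  simp only [List.foldl_cons, List.foldl_nil]
  rw [      PySem.List.pyRange_one_eq_nil (a := month - 4) (b := month - 4 + 0) (by omega),
      show PySem.List.pyRange (month - 4 + 0) (month + 5 - 3) 1 = [month - 4, month - 3, month - 2, month - 1, month, month + 1] from by
        rw [PySem.List.pyRange_one_cons (by omega), PySem.List.pyRange_one_cons (by omega), PySem.List.pyRange_one_cons (by omega), PySem.List.pyRange_one_cons (by omega), PySem.List.pyRange_one_cons (by omega), PySem.List.pyRange_one_cons (by omega), PySem.List.pyRange_one_eq_nil (by omega)]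
        all_goals simp only [List.cons.injEq, and_true, true_and]
        all_goals omega,
      show PySem.List.pyRange (month + 5 - 3) (month + 5) 1 = [month + 2, month + 3, month + 4] from by
        rw [PySem.List.pyRange_one_cons (by omega), PySem.List.pyRange_one_cons (by omega), PySem.List.pyRange_one_cons (by omega), PySem.List.pyRange_one_eq_nil (by omega)]
        all_goals simp only [List.cons.injEq, and_true, true_and]
        all_goals omega]
  simp only [List.map_cons, List.map_nil, List.cons_append, List.nil_append, List.append_nil,
    List.cons.injEq]
  refine ⟨?_, ?_, ?_, ?_, ?_, ?_, ?_, ?_, ?_⟩ <;>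
    first
      | trivial
      | (split_ifs <;>
          simp only [Prod.mk.injEq, PySem.Int.mod_eq_emod_of_pos (b := 12) (by norm_num)] <;>
          (first | trivial | omega))

theorem month_interval_eq_9 (year month : Int) (h : 12 ≤ month) :
    month_interval year month = month_interval_alt year month := by
  unfold month_interval month_interval_alt
  rw [show PySem.List.pyRange 1 5 1 = [1, 2, 3, 4] from by decide,
      show min 4 (max 0 (5 - month)) = 0 from by omega,
      show min 4 (max 0 (month - 8)) = 4 from by omega]
  simp only [List.foldl_cons, List.foldl_nil]
  rw [      PySem.List.pyRange_one_eq_nil (a := month - 4) (b := month - 4 + 0) (by omega),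
      show PySem.List.pyRange (month - 4 + 0) (month + 5 - 4) 1 = [month - 4, month - 3, month - 2, month - 1, month] from by
        rw [PySem.List.pyRange_one_cons (by omega), PySem.List.pyRange_one_cons (by omega), PySem.List.pyRange_one_cons (by omega), PySem.List.pyRange_one_cons (by omega), PySem.List.pyRange_one_cons (by omega), PySem.List.pyRange_one_eq_nil (by omega)]
        all_goals simp only [List.cons.injEq, and_true, true_and]
        all_goals omega,
      show PySem.List.pyRange (month + 5 - 4) (month + 5) 1 = [month + 1, month + 2, month + 3, month + 4] from by
        rw [PySem.List.pyRange_one_cons (by omega), PySem.List.pyRange_one_cons (by omega), PySem.List.pyRange_one_cons (by omega), PySem.List.pyRange_one_cons (by omega), PySem.List.pyRange_one_eq_nil (by omega)]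
        all_goals simp only [List.cons.injEq, and_true, true_and]
        all_goals omega]
  simp only [List.map_cons, List.map_nil, List.cons_append, List.nil_append, List.append_nil,
    List.cons.injEq]
  refine ⟨?_, ?_, ?_, ?_, ?_, ?_, ?_, ?_, ?_⟩ <;>
    first
      | trivial
      | (split_ifs <;>
          simp only [Prod.mk.injEq, PySem.Int.mod_eq_emod_of_pos (b := 12) (by norm_num)] <;>
          (first | trivial | omega))

-- ===== VERDICT (by name: the statement is the Claim_ definition above) =====
set_option maxHeartbeats 1600000 in
theorem month_interval_spec : Claim_equal_month_interval := by
  intro year month _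
  unfold Spec_month_interval
  by_cases h1 : month ≤ 1
  · exact month_interval_eq_1 year month h1
  by_cases h2 : month = 2
  · exact month_interval_eq_2 year month h2
  by_cases h3 : month = 3
  · exact month_interval_eq_3 year month h3
  by_cases h4 : month = 4
  · exact month_interval_eq_4 year month h4
  by_cases h5 : month ≤ 8
  · exact month_interval_eq_5 year month ⟨by omega, h5⟩
  by_cases h6 : month = 9
  · exact month_interval_eq_6 year month h6
  by_cases h7 : month = 10
  · exact month_interval_eq_7 year month h7
  by_cases h8 : month = 11
  · exact month_interval_eq_8 year month h8
  · exact month_interval_eq_9 year month (by omega)
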